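-- pv_equiv track=rewrite | github.com/suyashb95/WiktionaryParser | src/core.py | is_subheading
-- ===== SOURCE A (Python) =====
-- def is_subheading(child, parent):
--     child_headings = child.split(".")
--     parent_headings = parent.split(".")
--     if len(child_headings) <= len(parent_headings):
--         return False
--     for child_heading, parent_heading in zip(child_headings, parent_headings):
--         if child_heading != parent_heading:
--             return False
--     return True
-- ===== SOURCE B (Python) =====
-- def is_subheading(child, parent):
--     # parent's dotted segments are a strict prefix of child's iff child
--     # literally starts with parent followed by a '.', since segments never
--     # contain '.' (the '.' anchors the match at a segment boundary).
--     return child.startswith(parent + ".")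
-- ===== Notes on version B (the rewrite author's own statement) =====
-- stated objective: simpler
-- what changed: Replaces both split('.') tokenizations, the length comparison and the explicit zip loop with a single anchored prefix test child.startswith(parent + '.').
import Mathlib
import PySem

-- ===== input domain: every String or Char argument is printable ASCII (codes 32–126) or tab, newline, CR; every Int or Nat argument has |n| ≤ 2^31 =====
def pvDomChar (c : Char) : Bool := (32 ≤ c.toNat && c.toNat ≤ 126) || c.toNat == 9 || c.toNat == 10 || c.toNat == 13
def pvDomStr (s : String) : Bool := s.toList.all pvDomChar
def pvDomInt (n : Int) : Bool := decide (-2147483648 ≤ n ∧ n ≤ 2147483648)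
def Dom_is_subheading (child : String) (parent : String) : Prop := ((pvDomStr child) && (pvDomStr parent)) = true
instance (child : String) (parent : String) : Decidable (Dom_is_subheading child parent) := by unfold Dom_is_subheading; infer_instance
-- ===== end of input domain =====

-- B replaces A's split-into-segments + length check + zip loop by one anchored prefix
-- test child.startswith(parent + "."); objective: simpler.

-- ===== PORT A =====
-- the for-loop over zip(child_headings, parent_headings) with its early return
def is_subheading_loop : List (List Char × List Char) → Bool
  | [] => true
  | (child_heading, parent_heading) :: rest =>
    if child_heading ≠ parent_heading then false else is_subheading_loop rest

-- child.split(".") is ported as PySem.Chars.splitOn on the code points (exact: the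
-- separator "." is nonempty, and comparing the pieces as List Char is Python's str equality).
def is_subheading (child : String) (parent : String) : Bool :=
  let child_headings := PySem.Chars.splitOn child.toList ['.']
  let parent_headings := PySem.Chars.splitOn parent.toList ['.']
  if child_headings.length ≤ parent_headings.length then false
  else is_subheading_loop (child_headings.zip parent_headings)

-- ===== PORT B =====
def is_subheading_alt (child : String) (parent : String) : Bool :=
  PySem.Str.startswith child (parent ++ ".")

-- ===== PRECONDITION & SPEC =====
def Spec_is_subheading (child : String) (parent : String) (out : Bool) : Prop := out = is_subheading_alt child parent
instance (child : String) (parent : String) (out : Bool) : Decidable (Spec_is_subheading child parent out) := by unfold Spec_is_subheading; infer_instance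

-- ===== CLAIM (what is proved, stated in full; the proofs are below) =====
def Claim_equal_is_subheading : Prop := ∀ (child : String) (parent : String), Dom_is_subheading child parent → Spec_is_subheading child parent (is_subheading child parent)

-- ===== LEMMAS AND PROOFS =====

-- a simple structural model of splitting on '.'
def spMapHead (f : List Char → List Char) : List (List Char) → List (List Char)
  | [] => [] | h::r => f h :: r

def sp : List Char → List (List Char)
  | [] => [[]]
  | c::t => if c = '.' then [] :: sp t else spMapHead (c :: ·) (sp t)

theorem sp_ne_nil (l : List Char) : sp l ≠ [] := by
  induction l with
  | nil => simp [sp]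
  | cons c t ih =>
    simp only [sp]
    split
    · simp
    · cases h : sp t with
      | nil => exact absurd h ih
      | cons a r => simp [spMapHead]

theorem go_eq (fuel : Nat) : ∀ (l cur acc : _), l.length ≤ fuel →
  PySem.Chars.splitOn.go ['.'] fuel l cur acc = acc.reverse ++ spMapHead (cur.reverse ++ ·) (sp l) := by
  induction fuel with
  | zero =>
    intro l cur acc h
    have : l = [] := by cases l <;> simp_all
    subst this
    simp [PySem.Chars.splitOn.go, sp, spMapHead]
  | succ n ih =>
    intro l cur acc h
    cases l with
    | nil => simp [PySem.Chars.splitOn.go, sp, spMapHead]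
    | cons c rest =>
      rw [PySem.Chars.splitOn.go]
      by_cases hc : c = '.'
      · subst hc
        simp only [List.isPrefixOf, beq_self_eq_true, Bool.true_and, if_true, List.length_cons,
          List.length_nil, List.drop_succ_cons, List.drop_zero]
        rw [ih rest [] (cur.reverse :: acc) (by simpa using Nat.le_of_succ_le_succ h)]
        cases hr : sp rest with
        | nil => exact absurd hr (sp_ne_nil rest)
        | cons a r => simp [sp, spMapHead, hr]
      · have hpre : List.isPrefixOf ['.'] (c :: rest) = false := by
          simp [List.isPrefixOf]; exact fun e => hc e.symm
        rw [hpre]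
        simp only [Bool.false_eq_true, if_false]
        rw [ih rest (c :: cur) acc (by simpa using Nat.le_of_succ_le_succ h)]
        cases hr : sp rest with
        | nil => simp [sp, spMapHead, hr, hc]
        | cons a r => simp [sp, spMapHead, hr, hc]

theorem splitOn_eq_sp (s : List Char) : PySem.Chars.splitOn s ['.'] = sp s := by
  unfold PySem.Chars.splitOn
  rw [go_eq (s.length + 1) s [] [] (by omega)]
  cases h : sp s with
  | nil => exact absurd h (sp_ne_nil s)
  | cons a r => simp [spMapHead]

-- the inverse: rejoining the segments with '.'
def un : List (List Char) → List Char
  | [] => []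
  | [h] => h
  | h :: r :: t => h ++ '.' :: un (r :: t)

theorem sp_append (x y : List Char) : sp (x ++ '.' :: y) = sp x ++ sp y := by
  induction x with
  | nil => simp [sp]
  | cons c t ih =>
    by_cases hc : c = '.'
    · subst hc; simp [sp, ih]
    · simp only [List.cons_append, sp, if_neg hc, ih]
      cases ht : sp t with
      | nil => exact absurd ht (sp_ne_nil t)
      | cons a r => simp [spMapHead]

theorem un_sp (x : List Char) : un (sp x) = x := by
  induction x with
  | nil => simp [sp, un]
  | cons c t ih =>
    by_cases hc : c = '.'
    · subst hc
      simp only [sp, if_true]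
      cases ht : sp t with
      | nil => exact absurd ht (sp_ne_nil t)
      | cons a r => rw [ht] at ih; simp [un, ih]
    · simp only [sp, if_neg hc]
      cases ht : sp t with
      | nil => exact absurd ht (sp_ne_nil t)
      | cons a r =>
        rw [ht] at ih
        cases r with
        | nil => simp [un, spMapHead] at ih ⊢; simp [ih]
        | cons b s => simp [un, spMapHead] at ih ⊢; simp [ih]

theorem un_append (a b : List (List Char)) (ha : a ≠ []) (hb : b ≠ []) :
    un (a ++ b) = un a ++ '.' :: un b := by
  induction a with
  | nil => exact absurd rfl ha
  | cons h t ih =>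
    cases t with
    | nil =>
      cases b with
      | nil => exact absurd rfl hb
      | cons b0 bs => simp [un]
    | cons h2 t2 =>
      have := ih (by simp)
      simp only [List.cons_append] at this ⊢
      simp [un, this]

theorem loop_zip_iff_prefix : ∀ (p c : List (List Char)), p.length ≤ c.length →
    (is_subheading_loop (c.zip p) = true ↔ p <+: c) := by
  intro p
  induction p with
  | nil => intro c _; simp [is_subheading_loop]
  | cons ph pt ih =>
    intro c h
    cases c with
    | nil => simp at h
    | cons ch ct =>
      simp only [List.zip_cons_cons, is_subheading_loop]
      by_cases he : ch = ph
      · subst he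
        simp only [ne_eq, not_true_eq_false, List.cons_prefix_cons, true_and]
        simpa using ih ct (by simpa using h)
      · simp [he, List.cons_prefix_cons]
        intro e
        exact absurd e.symm he

theorem main_eq (child parent : String) : is_subheading child parent = is_subheading_alt child parent := by
  unfold is_subheading is_subheading_alt PySem.Str.startswith
  have htl : (parent ++ ".").toList = parent.toList ++ ['.'] := by
    simp [String.toList_append]
  rw [htl]
  simp only [splitOn_eq_sp]
  set C := child.toList with hC
  set P := parent.toList with hP
  by_cases h : (sp C).length ≤ (sp P).length
  · rw [if_pos h]
    by_contra hne
    have hsw : PySem.Chars.startswith C (P ++ ['.']) = true := by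
      cases hb : PySem.Chars.startswith C (P ++ ['.']) <;> simp_all
    rw [PySem.Chars.startswith_iff] at hsw
    obtain ⟨y, hy⟩ := hsw
    rw [List.append_assoc] at hy
    have : sp C = sp P ++ sp y := by
      rw [← hy]; exact sp_append P y
    have hlen : (sp C).length = (sp P).length + (sp y).length := by simp [this]
    have := List.length_pos_of_ne_nil (sp_ne_nil y)
    omega
  · rw [if_neg h]
    have hlt : (sp P).length < (sp C).length := by omega
    rw [Bool.eq_iff_iff, loop_zip_iff_prefix (sp P) (sp C) (Nat.le_of_lt hlt),
      PySem.Chars.startswith_iff]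
    constructor
    · intro hpre
      obtain ⟨r, hr⟩ := hpre
      have hrne : r ≠ [] := by
        intro he; rw [he] at hr; simp at hr
        have := congrArg List.length hr; omega
      have hCun : C = P ++ '.' :: un r := by
        conv_lhs => rw [← un_sp C]
        rw [← hr, un_append _ _ (sp_ne_nil P) hrne, un_sp]
      exact ⟨un r, by simp [hCun]⟩
    · intro hpre
      obtain ⟨y, hy⟩ := hpre
      rw [List.append_assoc] at hy
      have : sp C = sp P ++ sp y := by rw [← hy]; exact sp_append P y
      exact ⟨sp y, this.symm⟩

-- ===== VERDICT (by name: the statement is the Claim_ definition above) =====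
theorem is_subheading_spec : Claim_equal_is_subheading := by
  intro child parent _
  unfold Spec_is_subheading
  exact main_eq child parent
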